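-- pv_equiv track=rewrite | github.com/arsh-gupta-8/Sudoku | main.py | find_box_dim
-- ===== SOURCE A (Python) =====
-- def find_box_dim(data, x_val, y_val):
--     x_box = -1
--     y_box = -1
--     addition = 0
--     for box in range(9):
--         if x_val >= 55 + 50 * box + addition:
--             x_box += 1
--         if y_val >= 55 + 50 * box + addition:
--             y_box += 1
--         addition += 2
--         if box % 3 == 2:
--             addition += 3
--
--     if data == 1:
--         x_box_cord = x_box * 50 + (x_box // 3) * 3 + x_box * 2 + 55
--         y_box_cord = y_box * 50 + (y_box // 3) * 3 + y_box * 2 + 55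
--
--         return x_box_cord, y_box_cord
--     elif data == 2:
--         return x_box, y_box
-- ===== SOURCE B (Python) =====
-- _THRESHOLDS = (55, 107, 159, 214, 266, 318, 373, 425, 477)
--
-- def _box_index(v):
--     # binary search: number of thresholds <= v, minus one
--     lo, hi = 0, 9
--     while lo < hi:
--         mid = (lo + hi) // 2
--         if v >= _THRESHOLDS[mid]:
--             lo = mid + 1
--         else:
--             hi = mid
--     return lo - 1
--
-- def find_box_dim(data, x_val, y_val):
--     x_box = _box_index(x_val)
--     y_box = _box_index(y_val)
--     if data == 1:
--         return (x_box * 52 + (x_box // 3) * 3 + 55,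
--                 y_box * 52 + (y_box // 3) * 3 + 55)
--     if data == 2:
--         return (x_box, y_box)
-- ===== Notes on version B (the rewrite author's own statement) =====
-- stated objective: alternative
-- what changed: Replaces the 9-iteration accumulate-threshold-and-compare loop by a binary search (bisect_right by hand) over a precomputed sorted threshold list, and folds the coordinate formula x*50+x*2 into x*52.
import Mathlib
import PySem

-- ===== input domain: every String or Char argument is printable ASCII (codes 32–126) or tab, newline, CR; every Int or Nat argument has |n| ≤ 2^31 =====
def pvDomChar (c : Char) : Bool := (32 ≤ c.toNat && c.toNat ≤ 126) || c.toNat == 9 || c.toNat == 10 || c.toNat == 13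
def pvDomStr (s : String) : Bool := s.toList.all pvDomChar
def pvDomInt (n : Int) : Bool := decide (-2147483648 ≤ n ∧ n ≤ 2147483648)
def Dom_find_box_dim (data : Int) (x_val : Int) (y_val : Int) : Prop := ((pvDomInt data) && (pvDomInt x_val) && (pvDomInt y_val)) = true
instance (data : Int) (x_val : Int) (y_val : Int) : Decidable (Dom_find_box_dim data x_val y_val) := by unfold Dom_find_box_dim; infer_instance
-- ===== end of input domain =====

-- B replaces the 9-step accumulate-and-compare loop by a binary search over the precomputed
-- sorted threshold list (and folds x*50+x*2 into x*52); objective: alternative algorithm.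


-- ===== PORT A =====
def find_box_dim (data : Int) (x_val : Int) (y_val : Int) : Option (Int × Int) :=
  let s := (PySem.List.pyRange 0 9 1).foldl (fun (st : Int × Int × Int) box =>
    let xb := if x_val ≥ 55 + 50 * box + st.2.2 then st.1 + 1 else st.1
    let yb := if y_val ≥ 55 + 50 * box + st.2.2 then st.2.1 + 1 else st.2.1
    let add := st.2.2 + 2
    let add := if PySem.Int.mod box 3 == 2 then add + 3 else add
    (xb, yb, add)) (-1, -1, 0)
  let x_box := s.1
  let y_box := s.2.1
  if data == 1 then
    some (x_box * 50 + (PySem.Int.floordiv x_box 3) * 3 + x_box * 2 + 55,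
          y_box * 50 + (PySem.Int.floordiv y_box 3) * 3 + y_box * 2 + 55)
  else if data == 2 then
    some (x_box, y_box)
  else
    none

-- ===== PORT B =====
def pvThresholds : List Int := [55, 107, 159, 214, 266, 318, 373, 425, 477]

-- binary search (Python's while-loop, transcribed with a fuel counter; 9 ≥ loop bound)
def pvBoxSearch (v : Int) : Nat → Nat → Nat → Nat
  | 0, lo, _ => lo
  | fuel + 1, lo, hi =>
    if lo < hi then
      let mid := (lo + hi) / 2
      if v ≥ pvThresholds.getD mid 0 then
        pvBoxSearch v fuel (mid + 1) hi
      else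
        pvBoxSearch v fuel lo mid
    else lo

def pvBoxIndex (v : Int) : Int := (pvBoxSearch v 9 0 9 : Int) - 1

def find_box_dim_alt (data : Int) (x_val : Int) (y_val : Int) : Option (Int × Int) :=
  let x_box := pvBoxIndex x_val
  let y_box := pvBoxIndex y_val
  if data == 1 then
    some (x_box * 52 + (PySem.Int.floordiv x_box 3) * 3 + 55,
          y_box * 52 + (PySem.Int.floordiv y_box 3) * 3 + 55)
  else if data == 2 then
    some (x_box, y_box)
  else
    none

-- ===== PRECONDITION & SPEC =====
def Spec_find_box_dim (data : Int) (x_val : Int) (y_val : Int) (out : Option (Int × Int)) : Prop := out = find_box_dim_alt data x_val y_val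
instance (data : Int) (x_val : Int) (y_val : Int) (out : Option (Int × Int)) : Decidable (Spec_find_box_dim data x_val y_val out) := by unfold Spec_find_box_dim; infer_instance

-- ===== CLAIM (what is proved, stated in full; the proofs are below) =====
def Claim_equal_find_box_dim : Prop := ∀ (data : Int) (x_val : Int) (y_val : Int), Dom_find_box_dim data x_val y_val → Spec_find_box_dim data x_val y_val (find_box_dim data x_val y_val)

-- ===== LEMMAS AND PROOFS =====

lemma ebase (v : Int) (f k : Nat) : pvBoxSearch v f k k = k := by
  cases f <;> simp [pvBoxSearch]

lemma e09 (v : Int) (f : Nat) : pvBoxSearch v (f + 4) 0 9 =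
    if v ≥ 266 then
      (if v ≥ 425 then (if v ≥ 477 then 9 else 8)
       else if v ≥ 373 then 7 else if v ≥ 318 then 6 else 5)
    else
      (if v ≥ 159 then (if v ≥ 214 then 4 else 3)
       else if v ≥ 107 then 2 else if v ≥ 55 then 1 else 0) := by
  simp only [pvBoxSearch]; norm_num [pvThresholds, ebase]

-- the binary search agrees with the loop's threshold count for every value
lemma pvBoxSearch_eq_count (v : Int) :
    (pvBoxSearch v 9 0 9 : Int) - 1 =
      (if v ≥ 55 then (1:Int) else 0) + (if v ≥ 107 then 1 else 0) + (if v ≥ 159 then 1 else 0)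
      + (if v ≥ 214 then 1 else 0) + (if v ≥ 266 then 1 else 0) + (if v ≥ 318 then 1 else 0)
      + (if v ≥ 373 then 1 else 0) + (if v ≥ 425 then 1 else 0) + (if v ≥ 477 then 1 else 0) - 1 := by
  have h := e09 v 5
  norm_num at h
  rw [h]
  split_ifs <;> omega

def pvAdd (c : Int) (box : Int) : Int :=
  if PySem.Int.mod box 3 == 2 then c + 2 + 3 else c + 2

def pvCnt (v : Int) : Int → List Int → Int
  | _, [] => 0
  | c, box :: t => (if v ≥ 55 + 50 * box + c then 1 else 0) + pvCnt v (pvAdd c box) t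

def pvAddEnd : Int → List Int → Int
  | c, [] => c
  | c, box :: t => pvAddEnd (pvAdd c box) t

lemma fold_gen (x y : Int) (l : List Int) (a b c : Int) :
    (l.foldl (fun (st : Int × Int × Int) box =>
      let xb := if x ≥ 55 + 50 * box + st.2.2 then st.1 + 1 else st.1
      let yb := if y ≥ 55 + 50 * box + st.2.2 then st.2.1 + 1 else st.2.1
      let add := st.2.2 + 2
      let add := if PySem.Int.mod box 3 == 2 then add + 3 else add
      (xb, yb, add)) (a, b, c)) = (a + pvCnt x c l, b + pvCnt y c l, pvAddEnd c l) := by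
  induction l generalizing a b c with
  | nil => simp [pvCnt, pvAddEnd]
  | cons h t ih =>
    simp only [List.foldl, pvCnt, pvAddEnd, pvAdd]
    rw [ih]
    refine Prod.ext ?_ (Prod.ext ?_ rfl) <;> simp <;> split_ifs <;> omega

lemma fold_eq (x y : Int) :
    ((PySem.List.pyRange 0 9 1).foldl (fun (st : Int × Int × Int) box =>
      let xb := if x ≥ 55 + 50 * box + st.2.2 then st.1 + 1 else st.1
      let yb := if y ≥ 55 + 50 * box + st.2.2 then st.2.1 + 1 else st.2.1
      let add := st.2.2 + 2
      let add := if PySem.Int.mod box 3 == 2 then add + 3 else add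
      (xb, yb, add)) (-1, -1, 0)) = (pvBoxIndex x, pvBoxIndex y, 27) := by
  have hr : PySem.List.pyRange 0 9 1 = [0, 1, 2, 3, 4, 5, 6, 7, 8] := by decide
  have hA : pvAdd 0 0 = 2 ∧ pvAdd 2 1 = 4 ∧ pvAdd 4 2 = 9 ∧ pvAdd 9 3 = 11 ∧
      pvAdd 11 4 = 13 ∧ pvAdd 13 5 = 18 ∧ pvAdd 18 6 = 20 ∧ pvAdd 20 7 = 22 ∧
      pvAdd 22 8 = 27 := by decide
  have hE : pvAddEnd 0 [0, 1, 2, 3, 4, 5, 6, 7, 8] = 27 := by decide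
  have hx := pvBoxSearch_eq_count x
  have hy := pvBoxSearch_eq_count y
  rw [hr, fold_gen, hE]
  simp only [pvBoxIndex]
  rw [hx, hy]
  norm_num [pvCnt, hA.1, hA.2.1, hA.2.2.1, hA.2.2.2.1, hA.2.2.2.2.1, hA.2.2.2.2.2.1,
    hA.2.2.2.2.2.2.1, hA.2.2.2.2.2.2.2.1, hA.2.2.2.2.2.2.2.2, Prod.mk.injEq]
  constructor <;> split_ifs <;> omega

-- ===== VERDICT (by name: the statement is the Claim_ definition above) =====
theorem find_box_dim_spec : Claim_equal_find_box_dim := by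
  intro data x y _
  unfold Spec_find_box_dim find_box_dim find_box_dim_alt
  rw [fold_eq]
  by_cases h1 : data == 1
  · simp only [h1, if_pos]; ring_nf
  · by_cases h2 : data == 2 <;> simp [h1, h2]
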